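-- pv_equiv track=rewrite | github.com/vandmo/advent-of-code | 2015/16/parts.py | is_the_real_sue
-- ===== SOURCE A (Python) =====
-- import operator
--
-- known = """children: 3
-- cats: 7
-- samoyeds: 2
-- pomeranians: 3
-- akitas: 0
-- vizslas: 0
-- goldfish: 5
-- trees: 3
-- cars: 2
-- perfumes: 1"""
--
-- def is_the_real_sue(sue):
--     _, sue = sue
--     for item in known.splitlines():
--         id, count = item.split(":")
--         id = id.strip()
--         count = int(count)
--         if id in ("cats", "trees"):
--             cmp = operator.le
--         elif id in ("pomeranians", "goldfish"):
--             cmp = operator.gt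
--         else:
--             cmp = operator.eq
--         if count == 0:
--             if id in sue and not cmp(sue[id], 0):
--                 return False
--         elif id in sue:
--             if not cmp(count, sue[id]):
--                 return False
--     return True
-- ===== SOURCE B (Python) =====
-- import operator
--
-- # rules: attribute -> (comparator, known count); comparator is applied as cmp(known, value)
-- RULES = {
--     "children": (operator.eq, 3),
--     "cats": (operator.le, 7),
--     "samoyeds": (operator.eq, 2),
--     "pomeranians": (operator.gt, 3),
--     "akitas": (operator.eq, 0),
--     "vizslas": (operator.eq, 0),
--     "goldfish": (operator.gt, 5),
--     "trees": (operator.le, 3),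
--     "cars": (operator.eq, 2),
--     "perfumes": (operator.eq, 1),
-- }
--
-- def is_the_real_sue(sue):
--     _, sue = sue
--     for attr, value in sue.items():
--         rule = RULES.get(attr)
--         if rule is not None:
--             cmp, count = rule
--             if not cmp(count, value):
--                 return False
--     return True
-- ===== Notes on version B (the rewrite author's own statement) =====
-- stated objective: simpler
-- what changed: B replaces A's per-call parsing of the `known` multi-line string and its count==0 special case by a hardcoded rule table {attr: (comparator, count)} and a single loop over sue's own items, skipping attributes absent from the table.
import Mathlib
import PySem

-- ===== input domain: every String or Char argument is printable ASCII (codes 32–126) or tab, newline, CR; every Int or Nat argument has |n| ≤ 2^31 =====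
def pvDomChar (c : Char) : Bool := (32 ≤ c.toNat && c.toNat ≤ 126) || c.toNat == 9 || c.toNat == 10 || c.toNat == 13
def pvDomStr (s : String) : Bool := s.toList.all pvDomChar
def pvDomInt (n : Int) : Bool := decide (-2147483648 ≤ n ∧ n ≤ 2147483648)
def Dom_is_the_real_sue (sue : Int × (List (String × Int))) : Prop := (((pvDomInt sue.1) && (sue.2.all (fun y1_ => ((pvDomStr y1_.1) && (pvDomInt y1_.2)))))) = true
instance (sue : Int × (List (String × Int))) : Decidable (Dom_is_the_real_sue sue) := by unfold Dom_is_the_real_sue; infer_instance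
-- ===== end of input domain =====

-- B replaces A's per-call parsing of the `known` string (and its count==0 special case) by a
-- hardcoded rule table keyed by attribute and a single pass over sue's items (objective: simpler).

-- ===== PORT A =====
def pvKnown : String := "children: 3\ncats: 7\nsamoyeds: 2\npomeranians: 3\nakitas: 0\nvizslas: 0\ngoldfish: 5\ntrees: 3\ncars: 2\nperfumes: 1"

def pvCheckA : List String → PySem.Dict String Int → Bool
  | [], _ => true
  | item :: rest, sue =>
    match PySem.Str.split? item ":" with
    | some [id0, cnt] =>
      let id := PySem.Str.strip id0
      let count := (PySem.Int.ofStr? cnt).getD 0   -- int(count); every line of pvKnown parses, so the default is unreachable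
      let cmp : Int → Int → Bool :=
        if id = "cats" ∨ id = "trees" then fun a b => decide (a ≤ b)
        else if id = "pomeranians" ∨ id = "goldfish" then fun a b => decide (b < a)
        else fun a b => a == b
      if count == 0 then
        match sue.get? id with
        | some v => if !(cmp v 0) then false else pvCheckA rest sue
        | none => pvCheckA rest sue
      else
        match sue.get? id with
        | some v => if !(cmp count v) then false else pvCheckA rest sue
        | none => pvCheckA rest sue
    | _ => true  -- unreachable: every line of pvKnown splits into exactly two pieces

def is_the_real_sue (sue : Int × (List (String × Int))) : Bool :=
  pvCheckA (PySem.Str.splitlines pvKnown) (PySem.Dict.mk sue.2)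

-- ===== PORT B =====
-- RULES: attribute -> (comparator, known count); comparator applied as cmp(count, value)
def pvRules : PySem.Dict String ((Int → Int → Bool) × Int) := PySem.Dict.mk
  [ ("children", (fun a b => a == b, 3)),
    ("cats", (fun a b => decide (a ≤ b), 7)),
    ("samoyeds", (fun a b => a == b, 2)),
    ("pomeranians", (fun a b => decide (b < a), 3)),
    ("akitas", (fun a b => a == b, 0)),
    ("vizslas", (fun a b => a == b, 0)),
    ("goldfish", (fun a b => decide (b < a), 5)),
    ("trees", (fun a b => decide (a ≤ b), 3)),
    ("cars", (fun a b => a == b, 2)),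
    ("perfumes", (fun a b => a == b, 1)) ]

def pvCheckB : List (String × Int) → Bool
  | [] => true
  | (attr, v) :: rest =>
    match pvRules.get? attr with
    | none => pvCheckB rest
    | some (cmp, count) => if !(cmp count v) then false else pvCheckB rest

def is_the_real_sue_alt (sue : Int × (List (String × Int))) : Bool :=
  pvCheckB sue.2

-- ===== PRECONDITION & SPEC =====
-- Pre_ excludes association lists with duplicate keys: a Python dict cannot contain them, so such
-- lists represent no Python input; there A's first-match lookup and B's full iteration may differ.
def Pre_is_the_real_sue (sue : Int × (List (String × Int))) : Prop :=
  (sue.2.map Prod.fst).Nodup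
instance (sue : Int × (List (String × Int))) : Decidable (Pre_is_the_real_sue sue) := by unfold Pre_is_the_real_sue; infer_instance
def pvWitness_is_the_real_sue : (Int × (List (String × Int))) := (1, [("cats", 8), ("cars", 2)])

def Spec_is_the_real_sue (sue : Int × (List (String × Int))) (out : Bool) : Prop := out = is_the_real_sue_alt sue
instance (sue : Int × (List (String × Int))) (out : Bool) : Decidable (Spec_is_the_real_sue sue out) := by unfold Spec_is_the_real_sue; infer_instance

-- ===== CLAIM (what is proved, stated in full; the proofs are below) =====
def Claim_equal_is_the_real_sue : Prop := ∀ (sue : Int × (List (String × Int))), Dom_is_the_real_sue sue → Pre_is_the_real_sue sue → Spec_is_the_real_sue sue (is_the_real_sue sue)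

-- ===== LEMMAS AND PROOFS =====

-- the per-attribute rule, as a Bool predicate
def pvRuleOK (a : String) (v : Int) : Bool :=
  if a = "children" then ((3:Int) == v)
  else if a = "cats" then decide ((7:Int) ≤ v)
  else if a = "samoyeds" then ((2:Int) == v)
  else if a = "pomeranians" then decide (v < 3)
  else if a = "akitas" then ((0:Int) == v)
  else if a = "vizslas" then ((0:Int) == v)
  else if a = "goldfish" then decide (v < 5)
  else if a = "trees" then decide ((3:Int) ≤ v)
  else if a = "cars" then ((2:Int) == v)
  else if a = "perfumes" then ((1:Int) == v)
  else true

def pvKeys : List String := ["children","cats","samoyeds","pomeranians","akitas","vizslas","goldfish","trees","cars","perfumes"]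

lemma pvRuleOK_not_mem (a : String) (v : Int) (h : a ∉ pvKeys) : pvRuleOK a v = true := by
  simp [pvKeys] at h
  simp [pvRuleOK, h.1, h.2.1, h.2.2.1, h.2.2.2.1, h.2.2.2.2.1, h.2.2.2.2.2.1,
        h.2.2.2.2.2.2.1, h.2.2.2.2.2.2.2.1, h.2.2.2.2.2.2.2.2.1, h.2.2.2.2.2.2.2.2.2]

lemma stepB (a : String) (v : Int) :
    (match pvRules.get? a with
     | none => true
     | some (cmp, count) => cmp count v) = pvRuleOK a v := by
  by_cases h0 : a = "children"
  · subst h0; rfl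
  by_cases h1 : a = "cats"
  · subst h1; rfl
  by_cases h2 : a = "samoyeds"
  · subst h2; rfl
  by_cases h3 : a = "pomeranians"
  · subst h3; rfl
  by_cases h4 : a = "akitas"
  · subst h4; rfl
  by_cases h5 : a = "vizslas"
  · subst h5; rfl
  by_cases h6 : a = "goldfish"
  · subst h6; rfl
  by_cases h7 : a = "trees"
  · subst h7; rfl
  by_cases h8 : a = "cars"
  · subst h8; rfl
  by_cases h9 : a = "perfumes"
  · subst h9; rfl
  simp [pvRules, pvRuleOK, PySem.Dict.get?, h0, h1, h2, h3, h4, h5, h6, h7, h8, h9, Ne.symm h0, Ne.symm h1, Ne.symm h2, Ne.symm h3, Ne.symm h4, Ne.symm h5, Ne.symm h6, Ne.symm h7, Ne.symm h8, Ne.symm h9]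

lemma pvCheckB_all (l : List (String × Int)) :
    pvCheckB l = l.all (fun p => pvRuleOK p.1 p.2) := by
  induction l with
  | nil => rfl
  | cons p rest ih =>
    obtain ⟨a, v⟩ := p
    have h := stepB a v
    cases hg : pvRules.get? a with
    | none =>
      rw [hg] at h
      simp [pvCheckB, hg, ← h, ih]
    | some cc =>
      obtain ⟨c, k⟩ := cc
      rw [hg] at h
      simp only [pvCheckB, hg, List.all_cons, ← h, ih]
      cases c k v <;> simp

lemma pvLines : PySem.Str.splitlines pvKnown =
    ["children: 3","cats: 7","samoyeds: 2","pomeranians: 3","akitas: 0","vizslas: 0","goldfish: 5","trees: 3","cars: 2","perfumes: 1"] := by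
  decide

lemma optStep (o : Option Int) (p : Int → Bool) (r : Bool) :
    (match o with | some v => if !(p v) then false else r | none => r)
      = ((match o with | none => true | some v => p v) && r) := by
  cases o with
  | none => simp
  | some v => cases p v <;> simp

lemma stepA_children (rest : List String) (d : PySem.Dict String Int) :
    pvCheckA ("children: 3" :: rest) d
      = ((match d.get? "children" with | none => true | some v => pvRuleOK "children" v) && pvCheckA rest d) := by
  have h : pvCheckA ("children: 3" :: rest) d
      = (match d.get? "children" with
         | some v => if !((3:Int) == v) then false else pvCheckA rest d
         | none => pvCheckA rest d) := rfl
  rw [h, optStep]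
  congr 1

lemma stepA_cats (rest : List String) (d : PySem.Dict String Int) :
    pvCheckA ("cats: 7" :: rest) d
      = ((match d.get? "cats" with | none => true | some v => pvRuleOK "cats" v) && pvCheckA rest d) := by
  have h : pvCheckA ("cats: 7" :: rest) d
      = (match d.get? "cats" with
         | some v => if !decide ((7:Int) ≤ v) then false else pvCheckA rest d
         | none => pvCheckA rest d) := rfl
  rw [h, optStep]
  congr 1

lemma stepA_samoyeds (rest : List String) (d : PySem.Dict String Int) :
    pvCheckA ("samoyeds: 2" :: rest) d
      = ((match d.get? "samoyeds" with | none => true | some v => pvRuleOK "samoyeds" v) && pvCheckA rest d) := by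
  have h : pvCheckA ("samoyeds: 2" :: rest) d
      = (match d.get? "samoyeds" with
         | some v => if !((2:Int) == v) then false else pvCheckA rest d
         | none => pvCheckA rest d) := rfl
  rw [h, optStep]
  congr 1

lemma stepA_pomeranians (rest : List String) (d : PySem.Dict String Int) :
    pvCheckA ("pomeranians: 3" :: rest) d
      = ((match d.get? "pomeranians" with | none => true | some v => pvRuleOK "pomeranians" v) && pvCheckA rest d) := by
  have h : pvCheckA ("pomeranians: 3" :: rest) d
      = (match d.get? "pomeranians" with
         | some v => if !decide (v < 3) then false else pvCheckA rest d
         | none => pvCheckA rest d) := rfl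
  rw [h, optStep]
  congr 1

lemma stepA_akitas (rest : List String) (d : PySem.Dict String Int) :
    pvCheckA ("akitas: 0" :: rest) d
      = ((match d.get? "akitas" with | none => true | some v => pvRuleOK "akitas" v) && pvCheckA rest d) := by
  have h : pvCheckA ("akitas: 0" :: rest) d
      = (match d.get? "akitas" with
         | some v => if !(v == (0:Int)) then false else pvCheckA rest d
         | none => pvCheckA rest d) := rfl
  rw [h, optStep]
  congr 1
  cases d.get? "akitas" with
  | none => rfl
  | some v => simp [pvRuleOK, eq_comm]

lemma stepA_vizslas (rest : List String) (d : PySem.Dict String Int) :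
    pvCheckA ("vizslas: 0" :: rest) d
      = ((match d.get? "vizslas" with | none => true | some v => pvRuleOK "vizslas" v) && pvCheckA rest d) := by
  have h : pvCheckA ("vizslas: 0" :: rest) d
      = (match d.get? "vizslas" with
         | some v => if !(v == (0:Int)) then false else pvCheckA rest d
         | none => pvCheckA rest d) := rfl
  rw [h, optStep]
  congr 1
  cases d.get? "vizslas" with
  | none => rfl
  | some v => simp [pvRuleOK, eq_comm]

lemma stepA_goldfish (rest : List String) (d : PySem.Dict String Int) :
    pvCheckA ("goldfish: 5" :: rest) d
      = ((match d.get? "goldfish" with | none => true | some v => pvRuleOK "goldfish" v) && pvCheckA rest d) := by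
  have h : pvCheckA ("goldfish: 5" :: rest) d
      = (match d.get? "goldfish" with
         | some v => if !decide (v < 5) then false else pvCheckA rest d
         | none => pvCheckA rest d) := rfl
  rw [h, optStep]
  congr 1

lemma stepA_trees (rest : List String) (d : PySem.Dict String Int) :
    pvCheckA ("trees: 3" :: rest) d
      = ((match d.get? "trees" with | none => true | some v => pvRuleOK "trees" v) && pvCheckA rest d) := by
  have h : pvCheckA ("trees: 3" :: rest) d
      = (match d.get? "trees" with
         | some v => if !decide ((3:Int) ≤ v) then false else pvCheckA rest d
         | none => pvCheckA rest d) := rfl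
  rw [h, optStep]
  congr 1

lemma stepA_cars (rest : List String) (d : PySem.Dict String Int) :
    pvCheckA ("cars: 2" :: rest) d
      = ((match d.get? "cars" with | none => true | some v => pvRuleOK "cars" v) && pvCheckA rest d) := by
  have h : pvCheckA ("cars: 2" :: rest) d
      = (match d.get? "cars" with
         | some v => if !((2:Int) == v) then false else pvCheckA rest d
         | none => pvCheckA rest d) := rfl
  rw [h, optStep]
  congr 1

lemma stepA_perfumes (rest : List String) (d : PySem.Dict String Int) :
    pvCheckA ("perfumes: 1" :: rest) d
      = ((match d.get? "perfumes" with | none => true | some v => pvRuleOK "perfumes" v) && pvCheckA rest d) := by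
  have h : pvCheckA ("perfumes: 1" :: rest) d
      = (match d.get? "perfumes" with
         | some v => if !((1:Int) == v) then false else pvCheckA rest d
         | none => pvCheckA rest d) := rfl
  rw [h, optStep]
  congr 1

lemma pvCheckA_keys (d : PySem.Dict String Int) :
    pvCheckA (PySem.Str.splitlines pvKnown) d
      = pvKeys.all (fun k => match d.get? k with | none => true | some v => pvRuleOK k v) := by
  rw [pvLines, stepA_children, stepA_cats, stepA_samoyeds, stepA_pomeranians, stepA_akitas, stepA_vizslas, stepA_goldfish, stepA_trees, stepA_cars, stepA_perfumes]
  simp [pvKeys, pvCheckA]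

lemma bridge (l : List (String × Int)) (hnd : (l.map Prod.fst).Nodup) :
    pvKeys.all (fun k => match (PySem.Dict.mk l).get? k with | none => true | some v => pvRuleOK k v)
      = l.all (fun p => pvRuleOK p.1 p.2) := by
  rw [Bool.eq_iff_iff]
  simp only [List.all_eq_true]
  constructor
  · intro H p hp
    by_cases hk : p.1 ∈ pvKeys
    · have hg : (PySem.Dict.mk l).get? p.1 = some p.2 := by
        apply PySem.Dict.get?_of_mem_items
        · exact hp
        · exact hnd
      have h2 := H p.1 hk
      rw [hg] at h2
      exact h2
    · exact pvRuleOK_not_mem _ _ hk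
  · intro H k hk
    cases hg : (PySem.Dict.mk l).get? k with
    | none => trivial
    | some v =>
      exact H (k, v) (PySem.Dict.mem_items_of_get?_eq_some _ hg)

-- ===== VERDICT (by name: the statement is the Claim_ definition above) =====
theorem is_the_real_sue_spec : Claim_equal_is_the_real_sue := by
  intro sue _ hpre
  unfold Spec_is_the_real_sue is_the_real_sue is_the_real_sue_alt
  rw [pvCheckA_keys, bridge _ hpre, pvCheckB_all]
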